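-- pv_equiv track=rewrite | github.com/udhayprakash/pydev_pycheckio | 03_Sendgrid/01_stressful_subject.py | is_stressful
-- ===== SOURCE A (Python) =====
-- def is_stressful(subj):
--     """
--         recognise stressful subject
--     """
--     if subj.isupper() or subj.endswith('!!!'):
--         return True
--     else:
--         subj = subj.lower()
--         unique_str = ''
--         for _index, each_ch in enumerate(subj):
--             if _index and (subj[_index - 1] == each_ch or each_ch in ('.', '!', '-')):
--                 continue
--             unique_str += each_ch
--
--         for red_word in ("help", "asap", "urgent"):
--             if red_word in unique_str:
--                 return True
--     return False
-- ===== SOURCE B (Python) =====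
-- def is_stressful(subj):
--     """
--         recognise stressful subject
--     """
--     if subj.isupper() or subj.endswith('!!!'):
--         return True
--     s = subj.lower()
--     collapsed = s[:1] + ''.join(b for a, b in zip(s, s[1:]) if a != b)
--     cleaned = ''.join(c for c in collapsed if c not in '.!-')
--     return any(w in cleaned for w in ('help', 'asap', 'urgent'))
-- ===== Notes on version B (the rewrite author's own statement) =====
-- stated objective: idiomatic
-- what changed: A's single index-based accumulator loop (enumerate + subj[i-1] lookup + continue, building the string by repeated +=) is replaced by a declarative pipeline: collapse equal neighbours via zip(s, s[1:]), then filter out the punctuation characters, then any() over the keywords.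
import Mathlib
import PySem

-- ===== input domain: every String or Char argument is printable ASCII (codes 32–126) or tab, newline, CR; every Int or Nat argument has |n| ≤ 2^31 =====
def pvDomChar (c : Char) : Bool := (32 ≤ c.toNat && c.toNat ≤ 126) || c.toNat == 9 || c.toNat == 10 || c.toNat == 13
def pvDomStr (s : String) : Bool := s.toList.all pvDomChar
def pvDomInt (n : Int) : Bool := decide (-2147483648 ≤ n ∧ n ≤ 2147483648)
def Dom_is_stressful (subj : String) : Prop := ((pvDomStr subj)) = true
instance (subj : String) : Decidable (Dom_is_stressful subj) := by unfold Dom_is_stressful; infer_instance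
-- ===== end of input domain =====

-- B replaces A's index-and-lookup accumulator loop by a zip-with-neighbour collapse pass
-- followed by a punctuation filter and an any() over the keywords (idiomatic; same cost).

-- str.isupper() is not in PySem: hand port, exact on ASCII (cased chars are exactly the
-- letters there, so "some cased char and no lowercase one" is "some upper and no lower").
def pyStrIsUpper (cs : List Char) : Bool :=
  cs.any (fun c => PySem.Chars.isupper c) && !cs.any (fun c => PySem.Chars.islower c)

-- A's loop test on the enumerated lowered string
def condA (s : List Char) (p : Int × Char) : Bool :=
  decide (p.1 ≠ 0) && ((PySem.List.pyGet? s (p.1 - 1) == some p.2) || decide (p.2 ∈ ['.', '!', '-']))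

-- ===== PORT A =====
def is_stressful (subj : String) : Bool :=
  if pyStrIsUpper subj.toList || PySem.Str.endswith subj "!!!" then true
  else
    let s := PySem.Chars.lower subj.toList
    let unique_str := (PySem.List.enumerate s).foldl (fun acc p =>
      if condA s p then acc else acc ++ [p.2]) []
    ["help", "asap", "urgent"].any (fun w => PySem.Chars.isIn w.toList unique_str)

-- ===== PORT B =====
def is_stressful_alt (subj : String) : Bool :=
  if pyStrIsUpper subj.toList || PySem.Str.endswith subj "!!!" then true
  else
    let s := PySem.Chars.lower subj.toList
    let collapsed := s.take 1 ++ ((s.zip s.tail).filter (fun q => decide (q.1 ≠ q.2))).map (·.2)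
    let cleaned := collapsed.filter (fun c => decide (c ∉ ['.', '!', '-']))
    ["help", "asap", "urgent"].any (fun w => PySem.Chars.isIn w.toList cleaned)

-- ===== PRECONDITION & SPEC =====
def Spec_is_stressful (subj : String) (out : Bool) : Prop := out = is_stressful_alt subj
instance (subj : String) (out : Bool) : Decidable (Spec_is_stressful subj out) := by unfold Spec_is_stressful; infer_instance

-- ===== CLAIM (what is proved, stated in full; the proofs are below) =====
def Claim_equal_is_stressful : Prop := ∀ (subj : String), Dom_is_stressful subj → Spec_is_stressful subj (is_stressful subj)

-- ===== LEMMAS AND PROOFS =====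

-- the characters the else-branch keeps after the first one: those differing from their
-- left neighbour in the lowered string and not '.', '!', '-'
def keepA : List Char → Char → List Char
  | [], _ => []
  | c :: t, prev => (if prev ≠ c ∧ c ∉ ['.', '!', '-'] then [c] else []) ++ keepA t c

-- B's zip-with-previous pipeline computes keepA
theorem lemB (t : List Char) (p : Char) :
    (((((p :: t).zip t).filter (fun q => decide (q.1 ≠ q.2))).map (·.2)).filter
      (fun c => decide (c ∉ ['.', '!', '-']))) = keepA t p := by
  induction t generalizing p with
  | nil => rfl
  | cons c r ih =>
    simp only [List.zip_cons_cons, List.filter_cons, keepA]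
    by_cases h1 : p = c
    · simp [h1, ← ih c]
    · by_cases h2 : c ∈ ['.', '!', '-'] <;>
        · simp only [List.mem_cons, List.not_mem_nil, or_false] at h2
          simp [h1, h2, List.filter_cons, ← ih c] <;> tauto

-- A's filtered enumeration from index |pre| ≥ 1 onwards computes keepA of the last char of pre
theorem lemA (t : List Char) (pre : List Char) (lc : Char) (h : pre.getLast? = some lc) :
    ((PySem.List.enumerate t (pre.length : Int)).filter (fun p => !condA (pre ++ t) p)).map (·.2)
      = keepA t lc := by
  induction t generalizing pre lc with
  | nil => simp [PySem.List.enumerate_nil, keepA]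
  | cons c r ih =>
    have hne : pre ≠ [] := by rintro rfl; simp at h
    have hlen : 1 ≤ pre.length := List.length_pos_of_ne_nil hne
    rw [PySem.List.enumerate_cons, List.filter_cons]
    have hidx : ((pre.length : Int) - 1) = ((pre.length - 1 : Nat) : Int) := by push_cast [hlen]; ring
    have hget : PySem.List.pyGet? (pre ++ c :: r) ((pre.length : Int) - 1) = some lc := by
      rw [hidx, PySem.List.pyGet?_natCast, List.getElem?_append_left (by omega),
        ← List.getLast?_eq_getElem?, h]
    have hcond : condA (pre ++ c :: r) ((pre.length : Int), c)
        = ((lc == c) || decide (c ∈ ['.', '!', '-'])) := by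
      have hz : ((pre.length : Int)) ≠ 0 := by
        exact_mod_cast Nat.one_le_iff_ne_zero.mp hlen
      simp [condA, hget]
      exact fun _ => hne
    have hrec : ((PySem.List.enumerate r ((pre.length : Int) + 1)).filter
        (fun p => !condA (pre ++ c :: r) p)).map (·.2) = keepA r c := by
      have h2 : pre ++ c :: r = (pre ++ [c]) ++ r := by simp
      have h3 : ((pre.length : Int) + 1) = (((pre ++ [c]).length : Nat) : Int) := by simp
      rw [h2, h3, ih (pre ++ [c]) c (by simp)]
    rw [hcond]
    by_cases h1 : lc = c
    · simp [h1, keepA, hrec]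
    · by_cases h2 : c ∈ ['.', '!', '-'] <;>
        · simp only [List.mem_cons, List.not_mem_nil, or_false] at h2
          simp [h1, h2, keepA, hrec]

-- A's skip-loop as a filter-map of the enumeration
theorem loopA_eq (s : List Char) :
    (PySem.List.enumerate s).foldl (fun acc p => if condA s p then acc else acc ++ [p.2]) []
      = ((PySem.List.enumerate s).filter (fun p => !condA s p)).map (·.2) := by
  rw [show ((PySem.List.enumerate s).filter (fun p => !condA s p)).map (·.2)
      = [] ++ ((PySem.List.enumerate s).filter (fun p => !condA s p)).map (·.2) from rfl,
    ← PySem.List.foldl_append_if (fun p => !condA s p) (·.2)]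
  apply PySem.List.foldl_congr_mem
  intro acc x _
  by_cases hx : condA s x <;> simp [hx]

-- prepending a character that cannot start the needle does not change substring search
theorem isIn_cons_ne (h0 : Char) (w : List Char) (a : Char) (l : List Char) (hne : h0 ≠ a) :
    PySem.Chars.isIn (h0 :: w) (a :: l) = PySem.Chars.isIn (h0 :: w) l := by
  cases hA : PySem.Chars.isIn (h0 :: w) (a :: l) <;>
    cases hB : PySem.Chars.isIn (h0 :: w) l <;> try rfl
  · rw [PySem.Chars.isIn_eq_false_iff] at hA
    rw [PySem.Chars.isIn_iff_infix] at hB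
    exact absurd (hB.trans (List.suffix_cons a l).isInfix) hA
  · rw [PySem.Chars.isIn_iff_infix, List.infix_cons_iff] at hA
    rw [PySem.Chars.isIn_eq_false_iff] at hB
    rcases hA with hp | hi
    · exact absurd (List.cons_prefix_cons.mp hp).1 hne
    · exact absurd hi hB

-- ===== VERDICT (by name: the statement is the Claim_ definition above) =====
theorem is_stressful_spec : Claim_equal_is_stressful := by
  intro subj _
  unfold Spec_is_stressful is_stressful is_stressful_alt
  by_cases hg : (pyStrIsUpper subj.toList || PySem.Str.endswith subj "!!!") = true
  · simp only [if_pos hg]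
  · simp only [Bool.not_eq_true] at hg
    simp only [hg, if_neg Bool.false_ne_true]
    cases hs : PySem.Chars.lower subj.toList with
    | nil => simp
    | cons c t =>
      have hA : (PySem.List.enumerate (c :: t)).foldl
          (fun acc p => if condA (c :: t) p then acc else acc ++ [p.2]) []
            = c :: keepA t c := by
        rw [loopA_eq, PySem.List.enumerate_cons, List.filter_cons]
        have h0 : condA (c :: t) ((0 : Int), c) = false := by simp [condA]
        rw [h0]
        have h1 : ((1 : Int)) = ((([c] : List Char).length : Nat) : Int) := by simp
        simp only [Bool.not_false, if_pos, List.map_cons, zero_add]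
        rw [show (PySem.List.enumerate t 1)
            = PySem.List.enumerate t ((([c] : List Char).length : Nat) : Int) by rw [← h1],
          show (c :: t) = [c] ++ t from rfl, lemA t [c] c (by simp)]
      have hB : ((c :: t).take 1 ++
            (((c :: t).zip (c :: t).tail).filter (fun q => decide (q.1 ≠ q.2))).map (·.2)).filter
              (fun x => decide (x ∉ ['.', '!', '-']))
          = (if c ∉ ['.', '!', '-'] then [c] else []) ++ keepA t c := by
        simp only [List.tail_cons]
        rw [List.filter_append, lemB t c]
        simp [List.filter_cons]
      simp only [hA, hB]
      by_cases hc : c ∈ ['.', '!', '-']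
      · simp only [hc, not_true, if_neg (by tauto), List.nil_append]
        rcases (by simpa using hc : c = '.' ∨ c = '!' ∨ c = '-') with rfl | rfl | rfl <;>
          · simp only [List.any_cons, List.any_nil]
            rw [show ("help".toList) = 'h' :: "elp".toList from rfl,
              show ("asap".toList) = 'a' :: "sap".toList from rfl,
              show ("urgent".toList) = 'u' :: "rgent".toList from rfl,
              isIn_cons_ne _ _ _ _ (by decide), isIn_cons_ne _ _ _ _ (by decide),
              isIn_cons_ne _ _ _ _ (by decide)]
      · simp [hc]
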